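-- pv_equiv track=rewrite | github.com/LOGIC0805/ECNU-Online-Judge | Python语言程序设计(2017年秋)/1069. 字串非重复字符数排序.py | seeknum
-- ===== SOURCE A (Python) =====
-- def seeknum(astr):
--     str_tmp = list(astr)
--     num = lenth = len(astr)
--     for i in range(lenth-1):
--         for j in range(i+1,lenth):
--             if str_tmp[i] == '0':
--                 break
--             if str_tmp[i] == str_tmp[j]:
--                 num -= 1
--                 str_tmp[j] = '0'
--     return num
-- ===== SOURCE B (Python) =====
-- def seeknum(astr):
--     # One linear pass with a hash set: every '0' counts, a non-'0' char
--     # counts only on its first occurrence.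
--     count = 0
--     seen = set()
--     for c in astr:
--         if c == '0':
--             count += 1
--         elif c not in seen:
--             seen.add(c)
--             count += 1
--     return count
-- ===== Notes on version B (the rewrite author's own statement) =====
-- stated objective: faster
-- what changed: Replaced the O(n^2) nested index loops that dedup by overwriting later duplicates with '0' in a mutable list by a single linear pass that counts every '0' and each first occurrence of a non-'0' character using a hash set.
import Mathlib
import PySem

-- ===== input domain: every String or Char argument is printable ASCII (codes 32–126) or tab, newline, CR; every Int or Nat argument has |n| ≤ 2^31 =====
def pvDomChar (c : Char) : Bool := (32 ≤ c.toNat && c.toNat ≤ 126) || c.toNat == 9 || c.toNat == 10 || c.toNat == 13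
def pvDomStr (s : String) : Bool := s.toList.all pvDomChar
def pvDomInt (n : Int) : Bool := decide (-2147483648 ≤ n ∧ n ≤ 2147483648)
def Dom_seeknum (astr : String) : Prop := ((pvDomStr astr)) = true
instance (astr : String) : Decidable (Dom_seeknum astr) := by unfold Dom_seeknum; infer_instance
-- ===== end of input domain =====

-- B replaces A's O(n^2) nested dedup-by-overwriting loops with one linear pass over the
-- string using a hash set ('0' always counts, other characters count on first occurrence).

-- ===== PORT A =====
-- Literal port of A: nested index loops over a mutable char list; `break` is modelled by a
-- Bool flag carried in the inner fold state. All indices produced by range() are in bounds,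
-- so the pyGetD default ' ' is never used.
def seeknum (astr : String) : Int :=
  let str_tmp := astr.toList
  let lenth : Int := PySem.Str.len astr
  let num : Int := lenth
  let st :=
    (PySem.List.pyRange 0 (lenth - 1) 1).foldl (fun (st : List Char × Int) i =>
      let inner :=
        (PySem.List.pyRange (i + 1) lenth 1).foldl
          (fun (st2 : List Char × Int × Bool) j =>
            if st2.2.2 then st2
            else if PySem.List.pyGetD st2.1 i ' ' = '0' then
              (st2.1, st2.2.1, true)
            else if PySem.List.pyGetD st2.1 i ' ' = PySem.List.pyGetD st2.1 j ' ' then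
              (PySem.List.pySetD st2.1 j '0', st2.2.1 - 1, st2.2.2)
            else st2)
          (st.1, st.2, false)
      (inner.1, inner.2.1))
      (str_tmp, num)
  st.2

-- ===== PORT B =====
-- Literal port of B: one fold over the characters with state (count, seen-set).
def seeknum_alt (astr : String) : Int :=
  let st :=
    astr.toList.foldl
      (fun (st : Int × PySem.Set Char) c =>
        if c = '0' then (st.1 + 1, st.2)
        else if PySem.Set.contains st.2 c then st
        else (st.1 + 1, PySem.Set.add st.2 c))
      (0, PySem.Set.empty)
  st.1

-- ===== PRECONDITION & SPEC =====
def Spec_seeknum (astr : String) (out : Int) : Prop := out = seeknum_alt astr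
instance (astr : String) (out : Int) : Decidable (Spec_seeknum astr out) := by unfold Spec_seeknum; infer_instance

-- ===== CLAIM (what is proved, stated in full; the proofs are below) =====
def Claim_equal_seeknum : Prop := ∀ (astr : String), Dom_seeknum astr → Spec_seeknum astr (seeknum astr)

-- ===== LEMMAS AND PROOFS =====

def pvMark (c : Char) (r : List Char) : List Char :=
  r.map (fun d => if d = c then '0' else d)

def pvSub : List Char → Int
  | [] => 0
  | c :: r =>
    if c = '0' then pvSub r
    else (r.count c : Int) + pvSub (pvMark c r)
termination_by l => l.length
decreasing_by all_goals simp [pvMark]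

def pvSpec (l : List Char) : Int :=
  (l.count '0' : Int) + ((l.filter (fun c => c != '0')).toFinset.card : Int)

def pvBf : Int × PySem.Set Char → Char → Int × PySem.Set Char :=
  fun st c =>
    if c = '0' then (st.1 + 1, st.2)
    else if PySem.Set.contains st.2 c then st
    else (st.1 + 1, PySem.Set.add st.2 c)

theorem pvB_loop (l : List Char) (k : Int) (S : PySem.Set Char) :
    l.foldl pvBf (k, S)
    = (k + (l.count '0' : Int)
         + ((PySem.Set.update S (l.filter (fun c => c != '0'))).length : Int)
         - (S.length : Int),
       PySem.Set.update S (l.filter (fun c => c != '0'))) := by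
  induction l generalizing k S with
  | nil => simp [PySem.Set.update]
  | cons c r ih =>
    by_cases h0 : c = '0'
    · subst h0
      have hstep : pvBf (k, S) '0' = (k + 1, S) := by simp [pvBf]
      rw [List.foldl_cons, hstep, ih]
      simp
      omega
    · by_cases hc : c ∈ S
      · have hadd : PySem.Set.add S c = S := by simp [PySem.Set.add, PySem.Set.contains, hc]
        have hstep : pvBf (k, S) c = (k, S) := by simp [pvBf, h0, PySem.Set.contains, hc]
        rw [List.foldl_cons, hstep, ih]
        simp [PySem.Set.update, h0, hadd]
      · have hadd : PySem.Set.add S c = S ++ [c] := by simp [PySem.Set.add, PySem.Set.contains, hc]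
        have hstep : pvBf (k, S) c = (k + 1, S ++ [c]) := by simp [pvBf, h0, PySem.Set.contains, hc]
        rw [List.foldl_cons, hstep, ih]
        simp only [PySem.Set.update, List.filter_cons, List.count_cons]
        simp [hadd, h0]
        omega

theorem pvLen_ofList (xs : List Char) :
    ((PySem.Set.ofList xs).length : Int) = (xs.toFinset.card : Int) := by
  have h1 : (PySem.Set.ofList xs).toFinset = xs.toFinset := by
    ext c; simp [PySem.Set.mem_ofList]
  have h2 := List.toFinset_card_of_nodup (PySem.Set.nodup_ofList (xs := xs))
  rw [← h1, h2]

theorem pvB_eq_spec (astr : String) : seeknum_alt astr = pvSpec astr.toList := by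
  show (astr.toList.foldl pvBf (0, PySem.Set.empty)).1 = _
  rw [pvB_loop]
  have : PySem.Set.update PySem.Set.empty (astr.toList.filter (fun c => c != '0'))
      = PySem.Set.ofList (astr.toList.filter (fun c => c != '0')) := rfl
  rw [this]
  simp [pvSpec, pvLen_ofList, PySem.Set.empty]

def pvAf (i : Int) : List Char × Int × Bool → Int → List Char × Int × Bool :=
  fun st2 jj =>
    if st2.2.2 then st2
    else if PySem.List.pyGetD st2.1 i ' ' = '0' then (st2.1, st2.2.1, true)
    else if PySem.List.pyGetD st2.1 i ' ' = PySem.List.pyGetD st2.1 jj ' ' then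
      (PySem.List.pySetD st2.1 jj '0', st2.2.1 - 1, st2.2.2)
    else st2

theorem pvInner_go (i : Nat) (a : Char) (ha : a ≠ '0') :
    ∀ (d : Nat) (arr : List Char) (num : Int) (j : Nat),
      i < j → j + d = arr.length → arr.getD i ' ' = a →
      (PySem.List.pyRange (j : Int) (arr.length : Int) 1).foldl (pvAf (i : Int)) (arr, num, false)
      = (arr.take j ++ pvMark a (arr.drop j), num - ((arr.drop j).count a : Int), false) := by
  intro d
  induction d with
  | zero =>
    intro arr num j hij hlen hget
    rw [PySem.List.pyRange_one_eq_nil (by omega)]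
    have hj : j = arr.length := by omega
    simp [hj, pvMark]
  | succ d ih =>
    intro arr num j hij hlen hget
    have hjlt : j < arr.length := by omega
    rw [PySem.List.pyRange_one_cons (by exact_mod_cast hjlt)]
    rw [List.foldl_cons]
    have hgetI : PySem.List.pyGetD arr (i : Int) ' ' = a := by
      simpa using hget
    have hgetJ : PySem.List.pyGetD arr (j : Int) ' ' = arr[j] := by
      simp [List.getD_eq_getElem?_getD, List.getElem?_eq_getElem hjlt]
    have hstep0 : pvAf (i : Int) (arr, num, false) (j : Int)
        = if a = arr[j] then (PySem.List.pySetD arr (j : Int) '0', num - 1, false)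
          else (arr, num, false) := by
      simp [pvAf, hgetI, ha, hgetJ]
    by_cases heq : a = arr[j]
    · rw [hstep0, if_pos heq]
      have hset : PySem.List.pySetD arr (j : Int) '0' = arr.set j '0' := by
        simp
      rw [hset]
      have hlen' : ((arr.set j '0').length : Int) = (arr.length : Int) := by simp
      have harr' : ((j : Int) + 1) = ((j + 1 : Nat) : Int) := by push_cast; ring
      rw [harr', ← hlen']
      rw [ih (arr.set j '0') (num - 1) (j + 1) (by omega) (by simp; omega)
        (by rw [List.getD_eq_getElem?_getD, List.getElem?_set_ne (by omega),
                ← List.getD_eq_getElem?_getD, hget])]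
      have hdrop : arr.drop j = arr[j] :: arr.drop (j + 1) :=
        List.drop_eq_getElem_cons hjlt
      have hdropset : (arr.set j '0').drop (j + 1) = arr.drop (j + 1) := by
        rw [List.drop_set]; simp
      have htakeset : (arr.set j '0').take (j + 1) = arr.take j ++ ['0'] := by
        rw [List.set_eq_take_append_cons_drop, if_pos hjlt]
        rw [List.take_append]
        simp [List.length_take, Nat.min_eq_left (Nat.le_of_lt hjlt)]
      rw [hdropset, htakeset, hdrop]
      simp [pvMark, ← heq]
      omega
    · rw [hstep0, if_neg heq]
      have harr' : ((j : Int) + 1) = ((j + 1 : Nat) : Int) := by push_cast; ring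
      rw [harr']
      rw [ih arr num (j + 1) (by omega) (by omega) hget]
      have hdrop : arr.drop j = arr[j] :: arr.drop (j + 1) :=
        List.drop_eq_getElem_cons hjlt
      have htake : arr.take (j + 1) = arr.take j ++ [arr[j]] := by
        rw [List.take_add_one, List.getElem?_eq_getElem hjlt]; simp
      have hne : arr[j] ≠ a := fun h => heq h.symm
      rw [hdrop, htake]
      simp only [pvMark, List.map_cons, if_neg hne, List.count_cons]
      rw [List.append_assoc]
      simp [hne]

theorem pvAf_broken (i : Int) : ∀ (l : List Int) (arr : List Char) (num : Int),
    l.foldl (pvAf i) (arr, num, true) = (arr, num, true) := by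
  intro l
  induction l with
  | nil => intro arr num; rfl
  | cons x xs ih => intro arr num; rw [List.foldl_cons]; exact ih arr num

theorem pvInner_zero (i : Nat) (arr : List Char) (num : Int)
    (h0 : arr.getD i ' ' = '0') (b : Int) :
    ((PySem.List.pyRange ((i : Int) + 1) b 1).foldl (pvAf (i : Int)) (arr, num, false)).1 = arr ∧
    ((PySem.List.pyRange ((i : Int) + 1) b 1).foldl (pvAf (i : Int)) (arr, num, false)).2.1 = num := by
  by_cases hb : b ≤ (i : Int) + 1
  · rw [PySem.List.pyRange_one_eq_nil hb]
    simp
  · rw [PySem.List.pyRange_one_cons (by omega)]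
    rw [List.foldl_cons]
    have hgetI : PySem.List.pyGetD arr ((i : Nat) : Int) ' ' = '0' := by simpa using h0
    have hstep : pvAf (i : Int) (arr, num, false) ((i : Int) + 1) = (arr, num, true) := by
      simp [pvAf, hgetI]
    rw [hstep, pvAf_broken]
    simp

def pvAg (n : Int) : List Char × Int → Int → List Char × Int :=
  fun st i =>
    let inner := (PySem.List.pyRange (i + 1) n 1).foldl (pvAf i) (st.1, st.2, false)
    (inner.1, inner.2.1)

theorem pvOuter_go :
    ∀ (n : Nat) (suf pre : List Char) (num : Int), suf.length = n →
      ((PySem.List.pyRange (pre.length : Int) ((pre.length : Int) + (suf.length : Int) - 1) 1).foldl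
        (pvAg ((pre.length : Int) + (suf.length : Int))) (pre ++ suf, num)).2 = num - pvSub suf := by
  intro n
  induction n with
  | zero =>
    intro suf pre num hlen
    have : suf = [] := List.eq_nil_of_length_eq_zero hlen
    subst this
    rw [PySem.List.pyRange_one_eq_nil (by simp)]
    simp [pvSub]
  | succ k ih =>
    intro suf pre num hlen
    obtain ⟨c, r, rfl⟩ : ∃ c r, suf = c :: r := by
      cases suf with
      | nil => simp at hlen
      | cons c r => exact ⟨c, r, rfl⟩
    have hr : r.length = k := by simpa using hlen
    by_cases hk : k = 0
    · subst hk
      have : r = [] := List.eq_nil_of_length_eq_zero hr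
      subst this
      rw [PySem.List.pyRange_one_eq_nil (by simp)]
      simp [pvSub, pvMark]
    · have hcons : PySem.List.pyRange (pre.length : Int) ((pre.length : Int) + ((c :: r).length : Int) - 1) 1
          = (pre.length : Int) :: PySem.List.pyRange ((pre.length : Int) + 1) ((pre.length : Int) + ((c :: r).length : Int) - 1) 1 := by
        apply PySem.List.pyRange_one_cons
        simp only [List.length_cons]
        push_cast
        omega
      rw [hcons, List.foldl_cons]
      have harr : (pre ++ c :: r).getD pre.length ' ' = c := by
        rw [List.getD_eq_getElem?_getD, List.getElem?_append_right (by omega)]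
        simp
      by_cases h0 : c = '0'
      · -- inner loop breaks at once
        have hz := pvInner_zero pre.length (pre ++ c :: r) num (by rw [harr, h0]) ((pre.length : Int) + ((c :: r).length : Int))
        have hstep : pvAg ((pre.length : Int) + ((c :: r).length : Int)) (pre ++ c :: r, num) (pre.length : Int)
            = (pre ++ c :: r, num) := by
          simp only [pvAg]
          exact Prod.ext hz.1 hz.2
        rw [hstep]
        have hre : pre ++ c :: r = (pre ++ [c]) ++ r := by simp
        have hlen1 : ((pre ++ [c]).length : Int) = (pre.length : Int) + 1 := by simp
        have := ih r (pre ++ [c]) num hr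
        rw [hlen1] at this
        rw [hre]
        have hbound : (pre.length : Int) + ((c :: r).length : Int) - 1 = (pre.length : Int) + 1 + (r.length : Int) - 1 := by
          simp only [List.length_cons]; push_cast; omega
        have hbound2 : (pre.length : Int) + ((c :: r).length : Int) = (pre.length : Int) + 1 + (r.length : Int) := by
          simp only [List.length_cons]; push_cast; omega
        rw [hbound, hbound2, this]
        rw [pvSub, if_pos h0]
      · -- full inner pass marks duplicates of c
        have hg := pvInner_go pre.length c h0 r.length (pre ++ c :: r) num (pre.length + 1) (by omega)
          (by simp; omega) harr
        have hlen2 : ((pre ++ c :: r).length : Int) = (pre.length : Int) + ((c :: r).length : Int) := by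
          simp
        have hcast : ((pre.length : Int) + 1) = (((pre.length + 1 : Nat)) : Int) := by push_cast; ring
        have htake : (pre ++ c :: r).take (pre.length + 1) = pre ++ [c] := by
          have : pre ++ c :: r = (pre ++ [c]) ++ r := by simp
          rw [this, List.take_append_of_le_length (by simp), List.take_of_length_le (by simp)]
        have hdrop : (pre ++ c :: r).drop (pre.length + 1) = r := by
          have : pre ++ c :: r = (pre ++ [c]) ++ r := by simp
          rw [this, List.drop_append_of_le_length (by simp)]
          simp
        have hstep : pvAg ((pre.length : Int) + ((c :: r).length : Int)) (pre ++ c :: r, num) (pre.length : Int)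
            = ((pre ++ [c]) ++ pvMark c r, num - (r.count c : Int)) := by
          simp only [pvAg]
          rw [hcast, ← hlen2, hg]
          rw [htake, hdrop]
        rw [hstep]
        have hlen1 : ((pre ++ [c]).length : Int) = (pre.length : Int) + 1 := by simp
        have := ih (pvMark c r) (pre ++ [c]) (num - (r.count c : Int)) (by simp [pvMark, hr])
        rw [hlen1] at this
        have hmlen : ((pvMark c r).length : Int) = (r.length : Int) := by simp [pvMark]
        rw [hmlen] at this
        have hbound : (pre.length : Int) + ((c :: r).length : Int) - 1 = (pre.length : Int) + 1 + (r.length : Int) - 1 := by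
          simp only [List.length_cons]; push_cast; omega
        have hbound2 : (pre.length : Int) + ((c :: r).length : Int) = (pre.length : Int) + 1 + (r.length : Int) := by
          simp only [List.length_cons]; push_cast; omega
        rw [hbound, hbound2, this]
        rw [pvSub, if_neg h0]
        ring

theorem pvA_eq (astr : String) :
    seeknum astr = (astr.toList.length : Int) - pvSub astr.toList := by
  show ((PySem.List.pyRange 0 (PySem.Str.len astr - 1) 1).foldl
      (pvAg (PySem.Str.len astr)) (astr.toList, PySem.Str.len astr)).2 = _
  rw [PySem.Str.len_eq]
  have := pvOuter_go astr.toList.length astr.toList [] ((astr.toList.length : Int)) rfl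
  simpa using this

theorem pvMark_count0 (c : Char) (hc : c ≠ '0') (r : List Char) :
    (pvMark c r).count '0' = r.count '0' + r.count c := by
  induction r with
  | nil => simp [pvMark]
  | cons d r ih =>
    by_cases hdc : d = c
    · subst hdc
      simp [pvMark, hc] at ih ⊢
      omega
    · by_cases hd0 : d = '0'
      · subst hd0
        simp [pvMark, hdc] at ih ⊢
        omega
      · simp [pvMark, hdc, hd0] at ih ⊢
        omega

theorem pvMark_filter_toFinset (c : Char) (hc : c ≠ '0') (r : List Char) :
    ((pvMark c r).filter (fun d => d != '0')).toFinset
      = ((r.filter (fun d => d != '0')).toFinset).erase c := by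
  ext x
  simp only [List.mem_toFinset, List.mem_filter, Finset.mem_erase, bne_iff_ne, ne_eq, pvMark,
    List.mem_map]
  constructor
  · rintro ⟨⟨y, hy, hfy⟩, hx0⟩
    by_cases hyc : y = c
    · subst hyc
      simp at hfy
      exact absurd hfy.symm hx0
    · rw [if_neg hyc] at hfy
      subst hfy
      exact ⟨hyc, hy, hx0⟩
  · rintro ⟨hxc, hx, hx0⟩
    exact ⟨⟨x, hx, by rw [if_neg hxc]⟩, hx0⟩

theorem pvSub_spec : ∀ (n : Nat) (l : List Char), l.length = n →
    (l.length : Int) - pvSub l = pvSpec l := by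
  intro n
  induction n using Nat.strong_induction_on with
  | _ n ih =>
    intro l hlen
    cases l with
    | nil => simp [pvSub, pvSpec]
    | cons c r =>
      have hlen' : r.length + 1 = n := by simpa using hlen
      by_cases h0 : c = '0'
      · subst h0
        rw [pvSub, if_pos rfl]
        have hr := ih r.length (by omega) r rfl
        simp only [pvSpec, List.count_cons, List.filter_cons, List.length_cons] at hr ⊢
        simp only [beq_self_eq_true, if_true, bne_self_eq_false, Bool.false_eq_true, if_false]
        push_cast at hr ⊢
        omega
      · rw [pvSub, if_neg h0]
        have hm := ih (pvMark c r).length (by simp [pvMark]; omega) (pvMark c r) rfl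
        simp only [pvSpec] at hm
        rw [pvMark_count0 c h0, pvMark_filter_toFinset c h0] at hm
        rw [show (pvMark c r).length = r.length by simp [pvMark]] at hm
        set T := (r.filter (fun d => d != '0')).toFinset with hT
        have hmemT : c ∈ T ↔ 0 < r.count c := by
          rw [hT]
          simp [h0, List.count_pos_iff]
        have herase : (T.erase c).card = if c ∈ T then T.card - 1 else T.card :=
          Finset.card_erase_eq_ite
        have hposT : c ∈ T → 1 ≤ T.card := fun h => Finset.card_pos.mpr ⟨c, h⟩
        have hcard : ((c :: r).filter (fun d => d != '0')).toFinset.card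
            = if c ∈ T then T.card else T.card + 1 := by
          rw [List.filter_cons, if_pos (by simp [h0])]
          simp only [List.toFinset_cons, ← hT]
          by_cases hcT : c ∈ T
          · rw [if_pos hcT, Finset.insert_eq_self.mpr hcT]
          · rw [if_neg hcT, Finset.card_insert_of_notMem hcT]
        simp only [pvSpec, List.count_cons, hcard, List.length_cons] at hm ⊢
        have hne0 : ¬ (c == '0') = true := by simp [h0]
        simp only [hne0]
        by_cases hcT : c ∈ T
        · rw [if_pos hcT] at *
          rw [herase] at hm
          have h1 := hposT hcT
          have h2 := hmemT.mp hcT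
          push_cast at hm ⊢
          omega
        · rw [if_neg hcT] at *
          rw [herase] at hm
          have h2 : r.count c = 0 := by
            by_contra h
            exact hcT (hmemT.mpr (by omega))
          push_cast at hm ⊢
          omega

-- ===== VERDICT (by name: the statement is the Claim_ definition above) =====
theorem seeknum_spec : Claim_equal_seeknum := by
  intro astr _
  unfold Spec_seeknum
  rw [pvB_eq_spec, pvA_eq, pvSub_spec astr.toList.length astr.toList rfl]
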